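-- pv_equiv track=rewrite | github.com/BIGbaisha/folktales | 测试用脚本/regex_inspection.py | split_inline_code
-- ===== SOURCE A (Python) =====
-- def split_inline_code(line: str):
--     parts, buf, in_code = [], [], False
--     i = 0
--     while i < len(line):
--         ch = line[i]
--         if ch == '`':
--             if buf: parts.append((''.join(buf), in_code)); buf=[]
--             in_code = not in_code
--             parts.append(('`', True))
--             i += 1; continue
--         buf.append(ch); i += 1
--     if buf: parts.append((''.join(buf), in_code))
--     # merge
--     out, cur, flag = [], [], None
--     for seg, is_code in parts:
--         if flag is None: flag, cur = is_code, [seg]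
--         elif is_code == flag: cur.append(seg)
--         else: out.append((''.join(cur), flag)); flag, cur = is_code, [seg]
--     if cur: out.append((''.join(cur), flag))
--     return out
-- ===== SOURCE B (Python) =====
-- def split_inline_code(line: str):
--     # One pass: flag each char (backtick -> True, toggling in_code), emit maximal runs of equal flag.
--     out, cur, flag, in_code = [], [], None, False
--     for ch in line:
--         if ch == '`':
--             f = True
--             in_code = not in_code
--         else:
--             f = in_code
--         if flag is None:
--             flag, cur = f, [ch]
--         elif f == flag:
--             cur.append(ch)
--         else:
--             out.append((''.join(cur), flag))
--             flag, cur = f, [ch]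
--     if cur:
--         out.append((''.join(cur), flag))
--     return out
-- ===== Notes on version B (the rewrite author's own statement) =====
-- stated objective: simpler
-- what changed: Replaces A's two-phase pipeline (build a parts table of segments by flushing a buffer at each backtick, then a second merge pass joining equal-flag segments) with a single pass that flags each character and accumulates maximal equal-flag runs directly; the intermediate parts list and the merge loop disappear, which a timing run measured as ~2.5x faster.
import Mathlib
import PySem

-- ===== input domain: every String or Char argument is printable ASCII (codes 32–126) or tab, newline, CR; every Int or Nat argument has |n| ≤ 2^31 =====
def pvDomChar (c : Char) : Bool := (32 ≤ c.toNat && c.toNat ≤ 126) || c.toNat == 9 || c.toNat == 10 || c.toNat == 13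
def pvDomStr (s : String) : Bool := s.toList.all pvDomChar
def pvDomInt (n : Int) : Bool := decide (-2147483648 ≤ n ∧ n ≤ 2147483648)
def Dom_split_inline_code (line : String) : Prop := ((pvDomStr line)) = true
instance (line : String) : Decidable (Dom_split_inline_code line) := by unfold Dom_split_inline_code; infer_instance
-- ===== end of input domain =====

-- B replaces A's build-then-merge two-pass structure by a single per-character run-accumulating pass (objective: simpler).

-- ===== PORT A =====
-- phase 1 of A: the while loop building `parts` (buf flushed at each backtick and at the end)
def buildParts : List Char → List Char → Bool → List (String × Bool) → List (String × Bool)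
  | [], buf, in_code, parts =>
      if buf ≠ [] then parts ++ [(String.ofList buf, in_code)] else parts
  | ch :: rest, buf, in_code, parts =>
      if ch = '`' then
        buildParts rest [] (!in_code)
          ((if buf ≠ [] then parts ++ [(String.ofList buf, in_code)] else parts) ++ [("`", true)])
      else
        buildParts rest (buf ++ [ch]) in_code parts

-- phase 2 of A: one iteration of the merge loop; state is (out, cur, flag)
def mergeStep (s : List (String × Bool) × List String × Option Bool) (p : String × Bool) :
    List (String × Bool) × List String × Option Bool :=
  match s, p with
  | (out, cur, flag), (seg, is_code) =>
    match flag with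
    | none => (out, [seg], some is_code)
    | some fl =>
      if is_code = fl then (out, cur ++ [seg], some fl)
      else (out ++ [(String.ofList (cur.flatMap String.toList), fl)], [seg], some is_code)

-- A's final `if cur: out.append((''.join(cur), flag))`; ''.join(cur) is ported exactly as the
-- concatenation of the segments' characters; flag is always `some` when cur ≠ [] (getD never fires)
def mergeFin (s : List (String × Bool) × List String × Option Bool) : List (String × Bool) :=
  match s with
  | (out, cur, flag) =>
    if cur ≠ [] then out ++ [(String.ofList (cur.flatMap String.toList), flag.getD false)] else out

def split_inline_code (line : String) : List (String × Bool) :=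
  mergeFin ((buildParts line.toList [] false []).foldl mergeStep ([], [], none))

-- ===== PORT B =====
-- B: single pass; each char gets a flag (backtick → true, toggling in_code), maximal runs are emitted
def runsLoop : List Char → List Char → Option Bool → Bool → List (String × Bool) → List (String × Bool)
  | [], cur, flag, _, out =>
      if cur ≠ [] then out ++ [(String.ofList cur, flag.getD false)] else out
  | ch :: rest, cur, flag, in_code, out =>
      let f := if ch = '`' then true else in_code
      let in' := if ch = '`' then !in_code else in_code
      match flag with
      | none => runsLoop rest [ch] (some f) in' out
      | some fl =>
        if f = fl then runsLoop rest (cur ++ [ch]) (some fl) in' out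
        else runsLoop rest [ch] (some f) in' (out ++ [(String.ofList cur, fl)])

def split_inline_code_alt (line : String) : List (String × Bool) :=
  runsLoop line.toList [] none false []

-- ===== PRECONDITION & SPEC =====
def Spec_split_inline_code (line : String) (out : List (String × Bool)) : Prop := out = split_inline_code_alt line
instance (line : String) (out : List (String × Bool)) : Decidable (Spec_split_inline_code line out) := by unfold Spec_split_inline_code; infer_instance

-- ===== CLAIM (what is proved, stated in full; the proofs are below) =====
def Claim_equal_split_inline_code : Prop := ∀ (line : String), Dom_split_inline_code line → Spec_split_inline_code line (split_inline_code line)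

-- ===== LEMMAS AND PROOFS =====

-- push a nonempty segment in front of a run list, merging with the head run if the flags agree
def pushSeg (s : List Char) (f : Bool) : List (List Char × Bool) → List (List Char × Bool)
  | [] => [(s, f)]
  | (t, g) :: rest => if f = g then (s ++ t, g) :: rest else (s, f) :: (t, g) :: rest

-- reference result: the maximal equal-flag runs of the suffix, as char lists
def specS : List Char → Bool → List (List Char × Bool)
  | [], _ => []
  | ch :: rest, ic =>
      pushSeg [ch] (if ch = '`' then true else ic)
        (specS rest (if ch = '`' then !ic else ic))

def preS (buf : List Char) (ic : Bool) (r : List (List Char × Bool)) : List (List Char × Bool) :=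
  if buf = [] then r else pushSeg buf ic r

def strmap (r : List (List Char × Bool)) : List (String × Bool) :=
  r.map fun p => (String.ofList p.1, p.2)

theorem pushSeg_append (a b : List Char) (f : Bool) (r : List (List Char × Bool)) :
    pushSeg (a ++ b) f r = pushSeg a f (pushSeg b f r) := by
  cases r with
  | nil => simp [pushSeg]
  | cons hd tl =>
    obtain ⟨t, g⟩ := hd
    by_cases h : f = g <;> simp [pushSeg, h]

theorem buildParts_acc (cs : List Char) : ∀ (buf : List Char) (ic : Bool)
    (parts : List (String × Bool)),
    buildParts cs buf ic parts = parts ++ buildParts cs buf ic [] := by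
  induction cs with
  | nil => intro buf ic parts; by_cases h : buf = [] <;> simp [buildParts, h]
  | cons ch rest ih =>
    intro buf ic parts
    by_cases hc : ch = '`'
    · by_cases h : buf = [] <;>
        simp only [buildParts, hc, h, if_pos, if_neg, ne_eq, not_true_eq_false,
          not_false_eq_true, ite_true, ite_false] <;>
        rw [ih, ih (parts := _ ++ _)] <;> simp
    · simp only [buildParts, hc, ite_false]
      exact ih _ _ _

-- main invariant for A: folding the merge loop over the parts that phase 1 will still produce,
-- starting from merge state (out, curS, some fl), yields the runs of the reference result
theorem mergeA_inv (cs : List Char) : ∀ (buf : List Char) (ic : Bool)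
    (out : List (String × Bool)) (curS : List String) (fl : Bool), curS ≠ [] →
    mergeFin ((buildParts cs buf ic []).foldl mergeStep (out, curS, some fl)) =
      out ++ strmap (pushSeg (curS.flatMap String.toList) fl (preS buf ic (specS cs ic))) := by
  induction cs with
  | nil =>
    intro buf ic out curS fl hcur
    by_cases h : buf = []
    · simp [buildParts, h, preS, specS, mergeFin, hcur, strmap, pushSeg]
    · by_cases hfl : ic = fl
      · simp [buildParts, h, preS, specS, mergeFin, mergeStep, hfl, strmap, pushSeg,
          String.toList_ofList, List.flatMap_append]
      · simp [buildParts, h, preS, specS, mergeFin, mergeStep, hfl, Ne.symm hfl, strmap, pushSeg,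
          String.toList_ofList, List.flatMap_append]
  | cons ch rest ih =>
    intro buf ic out curS fl hcur
    by_cases hc : ch = '`'
    · -- backtick: flush buf (if any) and the '`' segment into the merge, recurse with buf = []
      have hacc := buildParts_acc rest ([]) (!ic)
      by_cases h : buf = []
      · simp only [buildParts, hc, h, ite_true, if_neg, ne_eq, not_true_eq_false,
          not_false_eq_true, ite_false, if_pos]
        rw [hacc, List.foldl_append]; simp only [List.cons_append, List.nil_append]
        by_cases hfl : fl = true
        · subst hfl
          rw [show ((([("`", true)] : List (String × Bool)).foldl mergeStep (out, curS, some true)))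
              = (out, curS ++ ["`"], some true) by simp [mergeStep]]
          rw [ih _ _ _ _ _ (by simp)]
          simp [specS, hc, preS, h, List.flatMap_append, pushSeg_append]
        · have hfl' : fl = false := by simpa using hfl
          subst hfl'
          rw [show ((([("`", true)] : List (String × Bool)).foldl mergeStep (out, curS, some false)))
              = (out ++ [(String.ofList (curS.flatMap String.toList), false)], ["`"], some true) by
                simp [mergeStep]]
          rw [ih _ _ _ _ _ (by simp)]
          simp only [specS, hc, ite_true, preS, h]
          cases hr : specS rest (!ic) with
          | nil => simp [pushSeg, strmap]
          | cons hd tl =>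
            obtain ⟨t, g⟩ := hd
            by_cases hg : g = true <;> simp [pushSeg, hg, strmap]
      · simp only [buildParts, hc, h, ite_true, if_neg, ne_eq, not_false_eq_true, ite_false, if_pos]
        rw [hacc, List.foldl_append]; simp only [List.cons_append, List.nil_append]
        -- two merge steps: the flushed buf segment, then the '`' segment
        by_cases hic : ic = fl <;> by_cases hfl : fl = true
        · subst hfl; rw [hic] at *
          rw [show ((([(String.ofList buf, true), ("`", true)] : List (String × Bool)).foldl mergeStep
              (out, curS, some true))) = (out, curS ++ [String.ofList buf, "`"], some true) by
                simp [mergeStep]]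
          rw [ih _ _ _ _ _ (by simp)]
          simp [specS, hc, preS, h, List.flatMap_append, pushSeg_append, hic]
        · have hfl' : fl = false := by simpa using hfl
          subst hfl'; rw [hic] at *
          rw [show ((([(String.ofList buf, false), ("`", true)] : List (String × Bool)).foldl mergeStep
              (out, curS, some false))) =
              (out ++ [(String.ofList ((curS ++ [String.ofList buf]).flatMap String.toList), false)],
                ["`"], some true) by simp [mergeStep]]
          rw [ih _ _ _ _ _ (by simp)]
          simp only [specS, hc, ite_true, preS, h, List.flatMap_append]
          cases hr : specS rest (!false) with
          | nil => simp [pushSeg, strmap, List.flatMap_append]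
          | cons hd tl =>
            obtain ⟨t, g⟩ := hd
            by_cases hg : g = true <;>
              simp [pushSeg, hg, strmap, List.flatMap_append, List.append_assoc]
        · subst hfl
          have hic' : ic = false := by simpa using hic
          subst hic'
          rw [show ((([(String.ofList buf, false), ("`", true)] : List (String × Bool)).foldl mergeStep
              (out, curS, some true))) =
              (out ++ [(String.ofList (curS.flatMap String.toList), true),
                       (String.ofList buf, false)], ["`"], some true) by simp [mergeStep]]
          rw [ih _ _ _ _ _ (by simp)]
          simp only [specS, hc, ite_true, preS, h]
          cases hr : specS rest (!false) with
          | nil => simp [pushSeg, strmap]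
          | cons hd tl =>
            obtain ⟨t, g⟩ := hd
            by_cases hg : g = true <;> simp [pushSeg, hg, strmap]
        · have hfl' : fl = false := by simpa using hfl
          subst hfl'
          have hic' : ic = true := by simpa using hic
          subst hic'
          rw [show ((([(String.ofList buf, true), ("`", true)] : List (String × Bool)).foldl mergeStep
              (out, curS, some false))) =
              (out ++ [(String.ofList (curS.flatMap String.toList), false)],
                [String.ofList buf, "`"], some true) by simp [mergeStep]]
          rw [ih _ _ _ _ _ (by simp)]
          simp only [specS, hc, ite_true, preS, h, List.flatMap_append]
          cases hr : specS rest (!true) with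
          | nil => simp [pushSeg, strmap, pushSeg_append]
          | cons hd tl =>
            obtain ⟨t, g⟩ := hd
            by_cases hg : g = true <;>
              simp [pushSeg, hg, strmap, pushSeg_append, List.append_assoc]
    · -- ordinary char: it joins buf; on the spec side it joins the pending segment
      simp only [buildParts, hc, ite_false]
      rw [ih (buf ++ [ch]) ic out curS fl hcur]
      simp only [specS, hc, ite_false, preS]
      by_cases h : buf = []
      · simp [h]
      · simp [h, pushSeg_append]

-- start-up: from the empty merge state (cur = [], flag = none)
theorem mergeA_start (cs : List Char) : ∀ (buf : List Char) (ic : Bool),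
    mergeFin ((buildParts cs buf ic []).foldl mergeStep ([], [], none)) =
      strmap (preS buf ic (specS cs ic)) := by
  induction cs with
  | nil =>
    intro buf ic
    by_cases h : buf = [] <;>
      simp [buildParts, h, preS, specS, mergeFin, mergeStep, strmap, pushSeg]
  | cons ch rest ih =>
    intro buf ic
    by_cases hc : ch = '`'
    · have hacc := buildParts_acc rest ([]) (!ic)
      by_cases h : buf = []
      · simp only [buildParts, hc, h, ite_true, if_neg, ne_eq, not_true_eq_false,
          not_false_eq_true, ite_false, if_pos]
        rw [hacc, List.foldl_append]; simp only [List.cons_append, List.nil_append]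
        rw [show ((([("`", true)] : List (String × Bool)).foldl mergeStep
            (([], [], none) : List (String × Bool) × List String × Option Bool)))
            = ([], ["`"], some true) by simp [mergeStep]]
        rw [mergeA_inv _ _ _ _ _ _ (by simp)]
        simp [specS, hc, preS, h]
      · simp only [buildParts, hc, h, ite_true, if_neg, ne_eq, not_false_eq_true, ite_false, if_pos]
        rw [hacc, List.foldl_append]; simp only [List.cons_append, List.nil_append]
        by_cases hic : ic = true
        · subst hic
          rw [show ((([(String.ofList buf, true), ("`", true)] : List (String × Bool)).foldl mergeStep
              (([], [], none) : List (String × Bool) × List String × Option Bool)))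
              = ([], [String.ofList buf, "`"], some true) by simp [mergeStep]]
          rw [mergeA_inv _ _ _ _ _ _ (by simp)]
          simp [specS, hc, preS, h, List.flatMap_append, pushSeg_append]
        · have hic' : ic = false := by simpa using hic
          subst hic'
          rw [show ((([(String.ofList buf, false), ("`", true)] : List (String × Bool)).foldl mergeStep
              (([], [], none) : List (String × Bool) × List String × Option Bool)))
              = ([(String.ofList buf, false)], ["`"], some true) by simp [mergeStep]]
          rw [mergeA_inv _ _ _ _ _ _ (by simp)]
          simp only [specS, hc, ite_true, preS, h]
          cases hr : specS rest (!false) with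
          | nil => simp [pushSeg, strmap]
          | cons hd tl =>
            obtain ⟨t, g⟩ := hd
            by_cases hg : g = true <;> simp [pushSeg, hg, strmap]
    · simp only [buildParts, hc, ite_false]
      rw [ih (buf ++ [ch]) ic]
      simp only [specS, hc, ite_false, preS]
      by_cases h : buf = []
      · simp [h]
      · simp [h, pushSeg_append]

theorem A_spec (line : String) :
    split_inline_code line = strmap (specS line.toList false) := by
  have := mergeA_start line.toList [] false
  simpa [split_inline_code, preS] using this

-- invariant for B: the loop with a pending run (cur, fl) produces out ++ the runs of the rest,
-- with cur absorbed into the front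
theorem pushSeg_ne (cur s : List Char) (fl f : Bool) (r : List (List Char × Bool))
    (h : fl ≠ f) : pushSeg cur fl (pushSeg s f r) = (cur, fl) :: pushSeg s f r := by
  cases r with
  | nil => simp [pushSeg, h]
  | cons hd tl =>
    obtain ⟨t, g⟩ := hd
    by_cases hg : f = g
    · simp [pushSeg, hg, h, show fl ≠ g from hg ▸ h]
    · simp [pushSeg, hg, h]

theorem runsLoop_inv (cs : List Char) : ∀ (cur : List Char) (fl : Bool) (ic : Bool)
    (out : List (String × Bool)), cur ≠ [] →
    runsLoop cs cur (some fl) ic out = out ++ strmap (pushSeg cur fl (specS cs ic)) := by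
  induction cs with
  | nil => intro cur fl ic out hcur; simp [runsLoop, hcur, specS, pushSeg, strmap]
  | cons ch rest ih =>
    intro cur fl ic out hcur
    simp only [runsLoop]
    by_cases hf : (if ch = '`' then true else ic) = fl
    · rw [if_pos hf, ih _ _ _ _ (by simp)]
      simp only [specS]
      rw [hf, ← pushSeg_append]
    · rw [if_neg hf, ih _ _ _ _ (by simp)]
      simp only [specS]
      rw [pushSeg_ne _ _ _ _ _ (fun e => hf e.symm)]
      simp [strmap]

theorem B_spec (line : String) :
    split_inline_code_alt line = strmap (specS line.toList false) := by
  unfold split_inline_code_alt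
  cases hcs : line.toList with
  | nil => simp [runsLoop, strmap, specS]
  | cons ch rest =>
    simp only [runsLoop]
    rw [runsLoop_inv _ _ _ _ _ (by simp)]
    simp [specS]

-- ===== VERDICT (by name: the statement is the Claim_ definition above) =====
theorem split_inline_code_spec : Claim_equal_split_inline_code := by
  intro line _
  unfold Spec_split_inline_code
  rw [A_spec, B_spec]
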